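-- pv_equiv track=rewrite | github.com/wonjininfo/CollaboNet | ops/ops.py | dataSplitdoc
-- ===== SOURCE A (Python) =====
-- def dataSplitdoc(PMID2IDtuple, PMID2IDtupleLen, PMIDListDict, ID2wordVecIdx):
--     answerData = dict()
--     lengthData = dict()
--     x_data = dict()
--     x_char_data = dict()
--
--     for key in PMIDListDict:
--         answerData[key] = list()
--         lengthData[key] = list()
--         x_data[key] = list()
--         x_char_data[key] = list()
--         for PMID in PMIDListDict[key]:
--             answerData[key].append([_[2] for _ in PMID2IDtuple[PMID]])
--             lengthData[key].append(PMID2IDtupleLen[PMID])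
--             x_data[key].append([ID2wordVecIdx[_[0]] for _ in PMID2IDtuple[PMID]])
--             x_char_data[key].append([_[1] for _ in PMID2IDtuple[PMID]])
--
--     return x_data, x_char_data, answerData, lengthData
-- ===== SOURCE B (Python) =====
-- def dataSplitdoc(PMID2IDtuple, PMID2IDtupleLen, PMIDListDict, ID2wordVecIdx):
--     # Phase 1: build a memo table mapping each listed PMID (once) to its
--     # (word indices, char lists, answers, length) record.
--     cache = {}
--     for pmids in PMIDListDict.values():
--         for pmid in pmids:
--             if pmid not in cache:
--                 tups = PMID2IDtuple[pmid]
--                 cache[pmid] = ([ID2wordVecIdx[w] for w, _c, _a in tups],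
--                                [c for _w, c, _a in tups],
--                                [a for _w, _c, a in tups],
--                                PMID2IDtupleLen[pmid])
--     # Phase 2: assemble the four grouped dicts from the memo table.
--     x_data = {k: [cache[p][0] for p in ps] for k, ps in PMIDListDict.items()}
--     x_char_data = {k: [cache[p][1] for p in ps] for k, ps in PMIDListDict.items()}
--     answerData = {k: [cache[p][2] for p in ps] for k, ps in PMIDListDict.items()}
--     lengthData = {k: [cache[p][3] for p in ps] for k, ps in PMIDListDict.items()}
--     return x_data, x_char_data, answerData, lengthData
-- ===== Notes on version B (the rewrite author's own statement) =====
-- stated objective: alternative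
-- what changed: B replaces A's fused nested loops (which re-scan PMID2IDtuple[PMID] three times at every occurrence of a PMID) by a two-phase algorithm: a memo dict mapping each listed PMID once to its (word-index, char, answer, length) record, then four dict comprehensions that assemble the grouped output by cache lookup, so a PMID occurring in several keys is processed once.
import Mathlib
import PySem

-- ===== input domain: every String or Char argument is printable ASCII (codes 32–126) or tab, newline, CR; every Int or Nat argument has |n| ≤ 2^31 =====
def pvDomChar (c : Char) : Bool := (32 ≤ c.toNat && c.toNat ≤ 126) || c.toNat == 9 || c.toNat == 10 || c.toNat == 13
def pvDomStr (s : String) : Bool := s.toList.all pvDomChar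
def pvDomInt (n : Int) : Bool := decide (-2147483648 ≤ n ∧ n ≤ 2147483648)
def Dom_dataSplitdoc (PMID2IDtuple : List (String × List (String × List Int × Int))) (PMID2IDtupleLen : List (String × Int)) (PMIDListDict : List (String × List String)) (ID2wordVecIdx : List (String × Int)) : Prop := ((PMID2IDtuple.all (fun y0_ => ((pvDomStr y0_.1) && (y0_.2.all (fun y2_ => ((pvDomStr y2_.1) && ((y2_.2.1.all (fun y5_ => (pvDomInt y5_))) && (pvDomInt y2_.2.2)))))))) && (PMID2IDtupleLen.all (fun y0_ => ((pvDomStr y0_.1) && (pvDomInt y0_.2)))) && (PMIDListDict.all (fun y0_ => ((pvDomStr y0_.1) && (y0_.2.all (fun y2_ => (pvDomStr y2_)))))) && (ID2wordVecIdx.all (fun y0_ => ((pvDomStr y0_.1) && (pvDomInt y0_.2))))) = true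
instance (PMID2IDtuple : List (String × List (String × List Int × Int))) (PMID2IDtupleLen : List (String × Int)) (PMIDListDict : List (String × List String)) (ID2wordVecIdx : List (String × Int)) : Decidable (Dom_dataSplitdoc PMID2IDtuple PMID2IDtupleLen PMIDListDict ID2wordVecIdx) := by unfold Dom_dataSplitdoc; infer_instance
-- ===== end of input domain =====

-- B replaces A's fused nested loops by a two-phase algorithm: a memo dict built once mapping
-- each listed PMID to its (word-index, char, answer, length) record, then four dict
-- comprehensions assembling the grouped output by cache lookup; objective: alternative.
-- Return value only (A mutates nothing the caller passed).

-- ===== PORT A =====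
-- Faithful transliteration of A: per key, insert empty lists, then per PMID append to each
-- dict entry (dict[key].append(...) = modify with list-append); KeyError-free inputs are Pre_.
def dataSplitdoc (PMID2IDtuple : List (String × List (String × List Int × Int))) (PMID2IDtupleLen : List (String × Int)) (PMIDListDict : List (String × List String)) (ID2wordVecIdx : List (String × Int)) : (List (String × List (List Int))) × (List (String × List (List (List Int)))) × (List (String × List (List Int))) × (List (String × List Int)) :=
  let tup := PySem.Dict.ofList PMID2IDtuple
  let tlen := PySem.Dict.ofList PMID2IDtupleLen
  let pml := PySem.Dict.ofList PMIDListDict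
  let w2i := PySem.Dict.ofList ID2wordVecIdx
  let st :=
    pml.keys.foldl
      (fun (st : PySem.Dict String (List (List Int)) × PySem.Dict String (List (List (List Int))) × PySem.Dict String (List (List Int)) × PySem.Dict String (List Int)) key =>
        let x_data := st.1.insert key []
        let x_char_data := st.2.1.insert key []
        let answerData := st.2.2.1.insert key []
        let lengthData := st.2.2.2.insert key []
        (pml.getD key []).foldl
          (fun st PMID =>
            let answerData := st.2.2.1.modify key [] (· ++ [(tup.getD PMID []).map (fun t => t.2.2)])
            let lengthData := st.2.2.2.modify key [] (· ++ [tlen.getD PMID 0])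
            let x_data := st.1.modify key [] (· ++ [(tup.getD PMID []).map (fun t => w2i.getD t.1 0)])
            let x_char_data := st.2.1.modify key [] (· ++ [(tup.getD PMID []).map (fun t => t.2.1)])
            (x_data, x_char_data, answerData, lengthData))
          (x_data, x_char_data, answerData, lengthData))
      (PySem.Dict.empty, PySem.Dict.empty, PySem.Dict.empty, PySem.Dict.empty)
  (st.1.items, st.2.1.items, st.2.2.1.items, st.2.2.2.items)

-- ===== PORT B =====
-- Transliteration of B: phase 1 builds the memo dict 'cache' (skip PMIDs already cached),
-- phase 2 builds each result dict as a dict comprehension = dict() of the mapped item pairs.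
def dataSplitdoc_alt (PMID2IDtuple : List (String × List (String × List Int × Int))) (PMID2IDtupleLen : List (String × Int)) (PMIDListDict : List (String × List String)) (ID2wordVecIdx : List (String × Int)) : (List (String × List (List Int))) × (List (String × List (List (List Int)))) × (List (String × List (List Int))) × (List (String × List Int)) :=
  let tup := PySem.Dict.ofList PMID2IDtuple
  let tlen := PySem.Dict.ofList PMID2IDtupleLen
  let pml := PySem.Dict.ofList PMIDListDict
  let w2i := PySem.Dict.ofList ID2wordVecIdx
  let cache :=
    pml.values.foldl
      (fun (cache : PySem.Dict String (List Int × List (List Int) × List Int × Int)) pmids =>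
        pmids.foldl
          (fun cache pmid =>
            if cache.contains pmid then cache
            else
              let tups := tup.getD pmid []
              cache.insert pmid
                (tups.map (fun t => w2i.getD t.1 0),
                 tups.map (fun t => t.2.1),
                 tups.map (fun t => t.2.2),
                 tlen.getD pmid 0))
          cache)
      PySem.Dict.empty
  let x_data := PySem.Dict.ofList (pml.items.map (fun kp => (kp.1, kp.2.map (fun p => (cache.getD p ([], [], [], 0)).1))))
  let x_char_data := PySem.Dict.ofList (pml.items.map (fun kp => (kp.1, kp.2.map (fun p => (cache.getD p ([], [], [], 0)).2.1))))
  let answerData := PySem.Dict.ofList (pml.items.map (fun kp => (kp.1, kp.2.map (fun p => (cache.getD p ([], [], [], 0)).2.2.1))))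
  let lengthData := PySem.Dict.ofList (pml.items.map (fun kp => (kp.1, kp.2.map (fun p => (cache.getD p ([], [], [], 0)).2.2.2))))
  (x_data.items, x_char_data.items, answerData.items, lengthData.items)

-- ===== PRECONDITION & SPEC =====
-- Pre_ excludes exactly the inputs on which Python A raises KeyError: a listed PMID missing
-- from PMID2IDtuple or PMID2IDtupleLen, or a word of a listed PMID missing from ID2wordVecIdx.
def Pre_dataSplitdoc (PMID2IDtuple : List (String × List (String × List Int × Int))) (PMID2IDtupleLen : List (String × Int)) (PMIDListDict : List (String × List String)) (ID2wordVecIdx : List (String × Int)) : Prop :=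
  ∀ kp ∈ PMIDListDict, ∀ pmid ∈ kp.2,
    (PySem.Dict.ofList PMID2IDtuple).contains pmid = true ∧
    (PySem.Dict.ofList PMID2IDtupleLen).contains pmid = true ∧
    ∀ t ∈ (PySem.Dict.ofList PMID2IDtuple).getD pmid [], (PySem.Dict.ofList ID2wordVecIdx).contains t.1 = true
instance (PMID2IDtuple : List (String × List (String × List Int × Int))) (PMID2IDtupleLen : List (String × Int)) (PMIDListDict : List (String × List String)) (ID2wordVecIdx : List (String × Int)) : Decidable (Pre_dataSplitdoc PMID2IDtuple PMID2IDtupleLen PMIDListDict ID2wordVecIdx) := by unfold Pre_dataSplitdoc; infer_instance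

def pvWitness_dataSplitdoc : (List (String × List (String × List Int × Int))) × (List (String × Int)) × (List (String × List String)) × (List (String × Int)) :=
  ([("p1", [("w", [3, 4], 1)])], [("p1", 1)], [("train", ["p1"]), ("dev", [])], [("w", 7)])

def Spec_dataSplitdoc (PMID2IDtuple : List (String × List (String × List Int × Int))) (PMID2IDtupleLen : List (String × Int)) (PMIDListDict : List (String × List String)) (ID2wordVecIdx : List (String × Int)) (out : (List (String × List (List Int))) × (List (String × List (List (List Int)))) × (List (String × List (List Int))) × (List (String × List Int))) : Prop := out = dataSplitdoc_alt PMID2IDtuple PMID2IDtupleLen PMIDListDict ID2wordVecIdx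
instance (PMID2IDtuple : List (String × List (String × List Int × Int))) (PMID2IDtupleLen : List (String × Int)) (PMIDListDict : List (String × List String)) (ID2wordVecIdx : List (String × Int)) (out : (List (String × List (List Int))) × (List (String × List (List (List Int)))) × (List (String × List (List Int))) × (List (String × List Int))) : Decidable (Spec_dataSplitdoc PMID2IDtuple PMID2IDtupleLen PMIDListDict ID2wordVecIdx out) := by
  unfold Spec_dataSplitdoc
  haveI h4 : DecidableEq (List (String × List Int)) := inferInstance
  haveI h3 : DecidableEq (List (String × List (List Int))) := inferInstance
  haveI h2 : DecidableEq (List (String × List (List (List Int)))) := inferInstance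
  infer_instance

-- ===== CLAIM (what is proved, stated in full; the proofs are below) =====
def Claim_equal_dataSplitdoc : Prop := ∀ (PMID2IDtuple : List (String × List (String × List Int × Int))) (PMID2IDtupleLen : List (String × Int)) (PMIDListDict : List (String × List String)) (ID2wordVecIdx : List (String × Int)), Dom_dataSplitdoc PMID2IDtuple PMID2IDtupleLen PMIDListDict ID2wordVecIdx → Pre_dataSplitdoc PMID2IDtuple PMID2IDtupleLen PMIDListDict ID2wordVecIdx → Spec_dataSplitdoc PMID2IDtuple PMID2IDtupleLen PMIDListDict ID2wordVecIdx (dataSplitdoc PMID2IDtuple PMID2IDtupleLen PMIDListDict ID2wordVecIdx)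

-- ===== LEMMAS AND PROOFS =====

-- The record B caches for one PMID (used only by the proofs below).
def pvMk (tup : PySem.Dict String (List (String × List Int × Int)))
    (tlen : PySem.Dict String Int) (w2i : PySem.Dict String Int) (p : String) :
    List Int × List (List Int) × List Int × Int :=
  ((tup.getD p []).map (fun t => w2i.getD t.1 0),
   (tup.getD p []).map (fun t => t.2.1),
   (tup.getD p []).map (fun t => t.2.2),
   tlen.getD p 0)

-- Phase-1 inner loop: caching preserves "every cached entry is pvMk of its key" and caches l.
theorem pv_cache_inner
    (tup : PySem.Dict String (List (String × List Int × Int)))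
    (tlen : PySem.Dict String Int) (w2i : PySem.Dict String Int)
    (l : List String) (d : PySem.Dict String (List Int × List (List Int) × List Int × Int))
    (hinv : ∀ q, d.contains q = true → d.getD q ([], [], [], 0) = pvMk tup tlen w2i q) :
    (∀ q, (l.foldl
        (fun cache pmid =>
          if cache.contains pmid then cache
          else
            let tups := tup.getD pmid []
            cache.insert pmid
              (tups.map (fun t => w2i.getD t.1 0),
               tups.map (fun t => t.2.1),
               tups.map (fun t => t.2.2),
               tlen.getD pmid 0))
        d).contains q = true →
      (l.foldl
        (fun cache pmid =>
          if cache.contains pmid then cache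
          else
            let tups := tup.getD pmid []
            cache.insert pmid
              (tups.map (fun t => w2i.getD t.1 0),
               tups.map (fun t => t.2.1),
               tups.map (fun t => t.2.2),
               tlen.getD pmid 0))
        d).getD q ([], [], [], 0) = pvMk tup tlen w2i q) ∧
    (∀ q, d.contains q = true ∨ q ∈ l →
      (l.foldl
        (fun cache pmid =>
          if cache.contains pmid then cache
          else
            let tups := tup.getD pmid []
            cache.insert pmid
              (tups.map (fun t => w2i.getD t.1 0),
               tups.map (fun t => t.2.1),
               tups.map (fun t => t.2.2),
               tlen.getD pmid 0))
        d).contains q = true) := by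
  induction l generalizing d with
  | nil =>
    refine ⟨hinv, ?_⟩
    intro q hq
    simpa using hq.resolve_right (by simp)
  | cons p ps ih =>
    simp only [List.foldl_cons]
    by_cases hc : d.contains p = true
    · simp only [hc, if_true]
      obtain ⟨ih1, ih2⟩ := ih d hinv
      refine ⟨ih1, ?_⟩
      intro q hq
      rcases hq with hq | hq
      · exact ih2 q (Or.inl hq)
      · rcases List.mem_cons.mp hq with rfl | hq
        · exact ih2 q (Or.inl hc)
        · exact ih2 q (Or.inr hq)
    · simp only [hc]
      have hinv' : ∀ q, (d.insert p (pvMk tup tlen w2i p)).contains q = true →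
          (d.insert p (pvMk tup tlen w2i p)).getD q ([], [], [], 0) = pvMk tup tlen w2i q := by
        intro q hq
        by_cases hqp : q = p
        · subst hqp
          simp [PySem.Dict.getD_insert_self]
        · rw [PySem.Dict.getD_insert, if_neg hqp]
          apply hinv
          rw [PySem.Dict.contains_insert] at hq
          simpa [hqp] using hq
      obtain ⟨ih1, ih2⟩ := ih (d.insert p (pvMk tup tlen w2i p)) hinv'
      refine ⟨fun q hq => ih1 q hq, ?_⟩
      intro q hq
      rcases hq with hq | hq
      · exact ih2 q (Or.inl (by rw [PySem.Dict.contains_insert]; simp [hq]))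
      · rcases List.mem_cons.mp hq with rfl | hq
        · exact ih2 q (Or.inl (PySem.Dict.contains_insert_self _ _ _))
        · exact ih2 q (Or.inr hq)

-- Phase-1 outer loop over the value lists.
theorem pv_cache_outer
    (tup : PySem.Dict String (List (String × List Int × Int)))
    (tlen : PySem.Dict String Int) (w2i : PySem.Dict String Int)
    (L : List (List String)) (d : PySem.Dict String (List Int × List (List Int) × List Int × Int))
    (hinv : ∀ q, d.contains q = true → d.getD q ([], [], [], 0) = pvMk tup tlen w2i q) :
    (∀ q, (L.foldl
        (fun cache pmids =>
          pmids.foldl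
            (fun cache pmid =>
              if cache.contains pmid then cache
              else
                let tups := tup.getD pmid []
                cache.insert pmid
                  (tups.map (fun t => w2i.getD t.1 0),
                   tups.map (fun t => t.2.1),
                   tups.map (fun t => t.2.2),
                   tlen.getD pmid 0))
            cache)
        d).contains q = true →
      (L.foldl
        (fun cache pmids =>
          pmids.foldl
            (fun cache pmid =>
              if cache.contains pmid then cache
              else
                let tups := tup.getD pmid []
                cache.insert pmid
                  (tups.map (fun t => w2i.getD t.1 0),
                   tups.map (fun t => t.2.1),
                   tups.map (fun t => t.2.2),
                   tlen.getD pmid 0))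
            cache)
        d).getD q ([], [], [], 0) = pvMk tup tlen w2i q) ∧
    (∀ q, d.contains q = true ∨ (∃ ps ∈ L, q ∈ ps) →
      (L.foldl
        (fun cache pmids =>
          pmids.foldl
            (fun cache pmid =>
              if cache.contains pmid then cache
              else
                let tups := tup.getD pmid []
                cache.insert pmid
                  (tups.map (fun t => w2i.getD t.1 0),
                   tups.map (fun t => t.2.1),
                   tups.map (fun t => t.2.2),
                   tlen.getD pmid 0))
            cache)
        d).contains q = true) := by
  induction L generalizing d with
  | nil =>
    refine ⟨hinv, ?_⟩
    intro q hq
    simpa using hq.resolve_right (by simp)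
  | cons ps pss ih =>
    simp only [List.foldl_cons]
    obtain ⟨h1, h2⟩ := pv_cache_inner tup tlen w2i ps d hinv
    obtain ⟨ih1, ih2⟩ := ih _ h1
    refine ⟨ih1, ?_⟩
    intro q hq
    rcases hq with hq | ⟨l, hl, hql⟩
    · exact ih2 q (Or.inl (h2 q (Or.inl hq)))
    · rcases List.mem_cons.mp hl with rfl | hl
      · exact ih2 q (Or.inl (h2 q (Or.inr hql)))
      · exact ih2 q (Or.inr ⟨l, hl, hql⟩)

-- dict[k].append on an entry just written: modify after insert at the same key is one insert.
theorem pv_modify_insert {ν : Type} (d : PySem.Dict String ν) (k : String) (a dflt : ν) (f : ν → ν) :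
    (d.insert k a).modify k dflt f = d.insert k (f a) := by
  simp [PySem.Dict.modify, PySem.Dict.getD_insert_self, PySem.Dict.insert_insert_self]

-- A's inner loop: repeated dict[key].append starting from dict.insert key a_i is one insert of
-- the accumulated list.
theorem pvA_inner
    (tup : PySem.Dict String (List (String × List Int × Int)))
    (tlen : PySem.Dict String Int) (w2i : PySem.Dict String Int)
    (key : String) (pmids : List String)
    (d1 : PySem.Dict String (List (List Int))) (d2 : PySem.Dict String (List (List (List Int))))
    (d3 : PySem.Dict String (List (List Int))) (d4 : PySem.Dict String (List Int))
    (a1 : List (List Int)) (a2 : List (List (List Int))) (a3 : List (List Int)) (a4 : List Int) :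
    pmids.foldl
      (fun (st : PySem.Dict String (List (List Int)) × PySem.Dict String (List (List (List Int))) × PySem.Dict String (List (List Int)) × PySem.Dict String (List Int)) PMID =>
        let answerData := st.2.2.1.modify key [] (· ++ [(tup.getD PMID []).map (fun t => t.2.2)])
        let lengthData := st.2.2.2.modify key [] (· ++ [tlen.getD PMID 0])
        let x_data := st.1.modify key [] (· ++ [(tup.getD PMID []).map (fun t => w2i.getD t.1 0)])
        let x_char_data := st.2.1.modify key [] (· ++ [(tup.getD PMID []).map (fun t => t.2.1)])
        (x_data, x_char_data, answerData, lengthData))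
      (d1.insert key a1, d2.insert key a2, d3.insert key a3, d4.insert key a4)
    = (d1.insert key (a1 ++ pmids.map (fun p => (tup.getD p []).map (fun t => w2i.getD t.1 0))),
       d2.insert key (a2 ++ pmids.map (fun p => (tup.getD p []).map (fun t => t.2.1))),
       d3.insert key (a3 ++ pmids.map (fun p => (tup.getD p []).map (fun t => t.2.2))),
       d4.insert key (a4 ++ pmids.map (fun p => tlen.getD p 0))) := by
  induction pmids generalizing a1 a2 a3 a4 with
  | nil => simp
  | cons p ps ih =>
    simp only [List.foldl_cons, pv_modify_insert]
    rw [ih]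
    simp

-- A's outer loop in canonical form: four independent insert-folds over the keys.
theorem pvA_outer
    (tup : PySem.Dict String (List (String × List Int × Int)))
    (tlen : PySem.Dict String Int) (w2i : PySem.Dict String Int)
    (pml : PySem.Dict String (List String)) (keys : List String)
    (st : PySem.Dict String (List (List Int)) × PySem.Dict String (List (List (List Int))) × PySem.Dict String (List (List Int)) × PySem.Dict String (List Int)) :
    keys.foldl
      (fun st key =>
        let x_data := st.1.insert key []
        let x_char_data := st.2.1.insert key []
        let answerData := st.2.2.1.insert key []
        let lengthData := st.2.2.2.insert key []
        (pml.getD key []).foldl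
          (fun st PMID =>
            let answerData := st.2.2.1.modify key [] (· ++ [(tup.getD PMID []).map (fun t => t.2.2)])
            let lengthData := st.2.2.2.modify key [] (· ++ [tlen.getD PMID 0])
            let x_data := st.1.modify key [] (· ++ [(tup.getD PMID []).map (fun t => w2i.getD t.1 0)])
            let x_char_data := st.2.1.modify key [] (· ++ [(tup.getD PMID []).map (fun t => t.2.1)])
            (x_data, x_char_data, answerData, lengthData))
          (x_data, x_char_data, answerData, lengthData))
      st
    = (keys.foldl (fun d key => d.insert key ((pml.getD key []).map (fun p => (tup.getD p []).map (fun t => w2i.getD t.1 0)))) st.1,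
       keys.foldl (fun d key => d.insert key ((pml.getD key []).map (fun p => (tup.getD p []).map (fun t => t.2.1)))) st.2.1,
       keys.foldl (fun d key => d.insert key ((pml.getD key []).map (fun p => (tup.getD p []).map (fun t => t.2.2)))) st.2.2.1,
       keys.foldl (fun d key => d.insert key ((pml.getD key []).map (fun p => tlen.getD p 0))) st.2.2.2) := by
  induction keys generalizing st with
  | nil => rfl
  | cons k ks ih =>
    simp only [List.foldl_cons]
    rw [pvA_inner]
    simp only [List.nil_append]
    exact ih _

-- One grouped-output component: B's dict comprehension over the items equals A's insert-fold
-- over the keys, given agreement of the per-PMID functions on listed PMIDs.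
theorem pvComp {t : Type} (pml : PySem.Dict String (List String)) (hnd : pml.keys.Nodup)
    (afun hfun : String -> t)
    (h : forall k, k ∈ pml.keys -> forall p, p ∈ pml.getD k [] -> hfun p = afun p) :
    (PySem.Dict.ofList (pml.items.map (fun kp => (kp.1, kp.2.map hfun)))).items
    = (pml.keys.foldl (fun d key => d.insert key ((pml.getD key []).map afun)) PySem.Dict.empty).items := by
  have hitems : pml.items = pml.keys.map (fun k => (k, pml.getD k [])) :=
    PySem.Dict.items_eq_map_keys pml hnd []
  have hR : (pml.keys.foldl (fun d key => d.insert key ((pml.getD key []).map afun)) PySem.Dict.empty).items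
      = pml.keys.map (fun k => (k, (pml.getD k []).map afun)) := by
    have := PySem.Dict.items_foldl_insert_fresh (l := pml.keys) (k := fun k => k)
      (v := fun k => (pml.getD k []).map afun) (d := PySem.Dict.empty) (by simp) (by simpa using hnd)
    simpa using this
  have hkeys : pml.keys = pml.items.map (fun kp => kp.1) := rfl
  have hL : (PySem.Dict.ofList (pml.items.map (fun kp => (kp.1, kp.2.map hfun)))).items
      = pml.items.map (fun kp => (kp.1, kp.2.map hfun)) := by
    have := PySem.Dict.items_foldl_insert_fresh (l := pml.items.map (fun kp => (kp.1, kp.2.map hfun)))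
      (k := fun kp => kp.1) (v := fun kp => kp.2) (d := PySem.Dict.empty) (by simp)
      (by rw [hkeys] at hnd; simpa [List.map_map, Function.comp] using hnd)
    simpa using this
  rw [hL, hR, hitems, List.map_map]
  apply List.map_congr_left
  intro k hk
  simp only [Function.comp]
  exact congrArg (fun l => (k, l)) (List.map_congr_left (fun p hp => h k hk p hp))

-- The whole equality, for arbitrary dicts (the ports apply it to the ofList dicts).
theorem pvMain
    (tup : PySem.Dict String (List (String × List Int × Int)))
    (tlen : PySem.Dict String Int) (pml : PySem.Dict String (List String))
    (w2i : PySem.Dict String Int) (hnd : pml.keys.Nodup) :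
    (let st :=
      pml.keys.foldl
        (fun (st : PySem.Dict String (List (List Int)) × PySem.Dict String (List (List (List Int))) × PySem.Dict String (List (List Int)) × PySem.Dict String (List Int)) key =>
          let x_data := st.1.insert key []
          let x_char_data := st.2.1.insert key []
          let answerData := st.2.2.1.insert key []
          let lengthData := st.2.2.2.insert key []
          (pml.getD key []).foldl
            (fun st PMID =>
              let answerData := st.2.2.1.modify key [] (· ++ [(tup.getD PMID []).map (fun t => t.2.2)])
              let lengthData := st.2.2.2.modify key [] (· ++ [tlen.getD PMID 0])
              let x_data := st.1.modify key [] (· ++ [(tup.getD PMID []).map (fun t => w2i.getD t.1 0)])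
              let x_char_data := st.2.1.modify key [] (· ++ [(tup.getD PMID []).map (fun t => t.2.1)])
              (x_data, x_char_data, answerData, lengthData))
            (x_data, x_char_data, answerData, lengthData))
        (PySem.Dict.empty, PySem.Dict.empty, PySem.Dict.empty, PySem.Dict.empty)
     (st.1.items, st.2.1.items, st.2.2.1.items, st.2.2.2.items))
    = (let cache :=
        pml.values.foldl
          (fun (cache : PySem.Dict String (List Int × List (List Int) × List Int × Int)) pmids =>
            pmids.foldl
              (fun cache pmid =>
                if cache.contains pmid then cache
                else
                  let tups := tup.getD pmid []
                  cache.insert pmid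
                    (tups.map (fun t => w2i.getD t.1 0),
                     tups.map (fun t => t.2.1),
                     tups.map (fun t => t.2.2),
                     tlen.getD pmid 0))
              cache)
          PySem.Dict.empty
       ((PySem.Dict.ofList (pml.items.map (fun kp => (kp.1, kp.2.map (fun p => (cache.getD p ([], [], [], 0)).1))))).items,
        (PySem.Dict.ofList (pml.items.map (fun kp => (kp.1, kp.2.map (fun p => (cache.getD p ([], [], [], 0)).2.1))))).items,
        (PySem.Dict.ofList (pml.items.map (fun kp => (kp.1, kp.2.map (fun p => (cache.getD p ([], [], [], 0)).2.2.1))))).items,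
        (PySem.Dict.ofList (pml.items.map (fun kp => (kp.1, kp.2.map (fun p => (cache.getD p ([], [], [], 0)).2.2.2))))).items)) := by
  have hcache := pv_cache_outer tup tlen w2i pml.values PySem.Dict.empty
    (by intro q hq; rw [PySem.Dict.contains_empty] at hq; cases hq)
  have hget : forall k, k ∈ pml.keys -> forall p, p ∈ pml.getD k [] ->
      (pml.values.foldl
        (fun (cache : PySem.Dict String (List Int × List (List Int) × List Int × Int)) pmids =>
          pmids.foldl
            (fun cache pmid =>
              if cache.contains pmid then cache
              else
                let tups := tup.getD pmid []
                cache.insert pmid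
                  (tups.map (fun t => w2i.getD t.1 0),
                   tups.map (fun t => t.2.1),
                   tups.map (fun t => t.2.2),
                   tlen.getD pmid 0))
            cache)
        PySem.Dict.empty).getD p ([], [], [], 0) = pvMk tup tlen w2i p := by
    intro k hk p hp
    apply hcache.1
    apply hcache.2
    refine Or.inr ⟨pml.getD k [], ?_, hp⟩
    rw [PySem.Dict.values_eq_map_keys pml hnd []]
    exact List.mem_map_of_mem hk
  show _ = _
  rw [pvA_outer]
  refine Prod.ext ?_ (Prod.ext ?_ (Prod.ext ?_ ?_))
  · exact (pvComp pml hnd _ _ (fun k hk p hp => by rw [hget k hk p hp]; rfl)).symm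
  · exact (pvComp pml hnd _ _ (fun k hk p hp => by rw [hget k hk p hp]; rfl)).symm
  · exact (pvComp pml hnd _ _ (fun k hk p hp => by rw [hget k hk p hp]; rfl)).symm
  · exact (pvComp pml hnd _ _ (fun k hk p hp => by rw [hget k hk p hp]; rfl)).symm

-- ===== VERDICT (by name: the statement is the Claim_ definition above) =====
theorem dataSplitdoc_spec : Claim_equal_dataSplitdoc := by
  intro PMID2IDtuple PMID2IDtupleLen PMIDListDict ID2wordVecIdx _ _
  unfold Spec_dataSplitdoc dataSplitdoc dataSplitdoc_alt
  exact pvMain (PySem.Dict.ofList PMID2IDtuple) (PySem.Dict.ofList PMID2IDtupleLen)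
    (PySem.Dict.ofList PMIDListDict) (PySem.Dict.ofList ID2wordVecIdx)
    (PySem.Dict.nodup_keys_ofList PMIDListDict)
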